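-- pv_equiv track=rewrite | github.com/jfoste81/NinerPath | backend/scheduler_service.py | _elective_combo_max_r
-- ===== SOURCE A (Python) =====
-- import math
--
-- def _elective_combo_max_r(n_pool: int, desired_max_r: int, budget: int) -> int:
--     """Largest r in [0, min(desired_max_r, n_pool)] with sum_{k=0}^{r} C(n_pool, k) <= budget."""
--     if n_pool <= 0 or budget < 1:
--         return 0
--     desired_max_r = min(max(0, desired_max_r), n_pool)
--     for r in range(desired_max_r, -1, -1):
--         total = sum(math.comb(n_pool, k) for k in range(r + 1))
--         if total <= budget:
--             return r
--     return 0
-- ===== SOURCE B (Python) =====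
-- import math
--
-- def _elective_combo_max_r(n_pool: int, desired_max_r: int, budget: int) -> int:
--     """Largest r in [0, min(desired_max_r, n_pool)] with sum_{k=0}^{r} C(n_pool, k) <= budget.
--
--     Single upward pass keeping a running cumulative sum; since the cumulative
--     sum is nondecreasing in r, we can stop as soon as adding the next binomial
--     term would exceed the budget.
--     """
--     if n_pool <= 0 or budget < 1:
--         return 0
--     cap = min(max(0, desired_max_r), n_pool)
--     total = 1  # C(n_pool, 0)
--     r = 0
--     while r < cap:
--         nxt = total + math.comb(n_pool, r + 1)
--         if nxt > budget:
--             break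
--         total = nxt
--         r += 1
--     return r
-- ===== Notes on version B (the rewrite author's own statement) =====
-- stated objective: faster
-- what changed: Replaces the descending scan that recomputes the full binomial prefix sum for every candidate r (O(r^2) comb calls) with one ascending pass that maintains a running cumulative sum and stops as soon as the next term would exceed the budget (O(r) comb calls), justified by monotonicity of the prefix sum.
import Mathlib
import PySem

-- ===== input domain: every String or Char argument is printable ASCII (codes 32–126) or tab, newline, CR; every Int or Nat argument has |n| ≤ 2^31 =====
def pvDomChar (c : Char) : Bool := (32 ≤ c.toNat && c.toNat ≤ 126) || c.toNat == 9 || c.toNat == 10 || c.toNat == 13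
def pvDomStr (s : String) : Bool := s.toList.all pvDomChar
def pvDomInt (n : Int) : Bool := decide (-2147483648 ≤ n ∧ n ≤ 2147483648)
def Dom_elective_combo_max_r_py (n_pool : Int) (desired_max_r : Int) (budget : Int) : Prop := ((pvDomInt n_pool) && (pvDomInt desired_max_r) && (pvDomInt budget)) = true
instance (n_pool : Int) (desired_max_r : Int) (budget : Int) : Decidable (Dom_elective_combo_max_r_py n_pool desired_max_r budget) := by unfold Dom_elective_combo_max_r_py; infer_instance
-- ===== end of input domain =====

-- B replaces A's descending scan (which recomputes the whole binomial prefix sum for every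
-- candidate r) by one ascending pass with a running cumulative sum that stops at the budget;
-- a timing run measured B faster on the large inputs.


-- math.comb(n, k); exact here: both ports only call it with n ≥ 1 and k ≥ 0
def pvComb (n k : Int) : Int := (Nat.choose n.toNat k.toNat : Int)

-- ===== PORT A =====
-- the `for r in range(desired_max_r, -1, -1)` loop with its early `return r`
def pvALoop (n_pool budget : Int) : List Int → Int
  | [] => 0
  | r :: rest =>
      let total := (PySem.List.pyRange 0 (r + 1) 1).foldl (fun acc k => acc + pvComb n_pool k) 0
      if total ≤ budget then r else pvALoop n_pool budget rest

def elective_combo_max_r_py (n_pool : Int) (desired_max_r : Int) (budget : Int) : Int :=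
  if n_pool ≤ 0 ∨ budget < 1 then 0
  else
    let d := min (max 0 desired_max_r) n_pool
    pvALoop n_pool budget (PySem.List.pyRange d (-1) (-1))

-- ===== PORT B =====
-- the `while r < cap` loop; r rises by 1 each iteration, so fuel = cap.toNat suffices
def pvBLoop (n_pool budget cap : Int) : Nat → Int → Int → Int
  | 0, _, r => r
  | fuel + 1, total, r =>
      if r < cap then
        -- nxt = total + math.comb(n_pool, r + 1), inlined
        if total + pvComb n_pool (r + 1) > budget then r
        else pvBLoop n_pool budget cap fuel (total + pvComb n_pool (r + 1)) (r + 1)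
      else r

def elective_combo_max_r_py_alt (n_pool : Int) (desired_max_r : Int) (budget : Int) : Int :=
  if n_pool ≤ 0 ∨ budget < 1 then 0
  else
    let cap := min (max 0 desired_max_r) n_pool
    pvBLoop n_pool budget cap cap.toNat 1 0

-- ===== PRECONDITION & SPEC =====
def Spec_elective_combo_max_r_py (n_pool : Int) (desired_max_r : Int) (budget : Int) (out : Int) : Prop := out = elective_combo_max_r_py_alt n_pool desired_max_r budget
instance (n_pool : Int) (desired_max_r : Int) (budget : Int) (out : Int) : Decidable (Spec_elective_combo_max_r_py n_pool desired_max_r budget out) := by unfold Spec_elective_combo_max_r_py; infer_instance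

-- ===== CLAIM (what is proved, stated in full; the proofs are below) =====
def Claim_equal_elective_combo_max_r_py : Prop := ∀ (n_pool : Int) (desired_max_r : Int) (budget : Int), Dom_elective_combo_max_r_py n_pool desired_max_r budget → Spec_elective_combo_max_r_py n_pool desired_max_r budget (elective_combo_max_r_py n_pool desired_max_r budget)

-- ===== LEMMAS AND PROOFS =====

-- the binomial prefix sum S N m = Σ_{k=0}^{m} C(N, k), as a Nat
def pvS (N m : Nat) : Nat := ∑ k ∈ Finset.range (m + 1), Nat.choose N k

lemma pvS_succ (N m : Nat) : pvS N (m + 1) = pvS N m + Nat.choose N (m + 1) := by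
  simp [pvS, Finset.sum_range_succ]

lemma pvS_mono (N : Nat) {j m : Nat} (h : j ≤ m) : pvS N j ≤ pvS N m := by
  unfold pvS
  apply Finset.sum_le_sum_of_subset
  intro x hx
  simp only [Finset.mem_range] at hx ⊢
  omega

lemma pvComb_natCast (n : Int) (m : Nat) : pvComb n ((m : Int)) = (Nat.choose n.toNat m : Int) := by
  simp [pvComb]

-- A's inner sum over range(r+1) equals pvS
lemma pvALoop_total (n : Int) (m : Nat) :
    (PySem.List.pyRange 0 ((m : Int) + 1) 1).foldl (fun acc k => acc + pvComb n k) 0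
      = (pvS n.toNat m : Int) := by
  induction m with
  | zero =>
      rw [show (((0 : Nat) : Int) + 1) = (0 : Int) + 1 by norm_num,
        PySem.List.pyRange_one_singleton]
      simp [pvComb, pvS]
  | succ m ih =>
      rw [show (((m + 1 : Nat) : Int) + 1) = ((m : Int) + 1) + 1 by push_cast; ring]
      rw [PySem.List.pyRange_one_succ_right (by positivity), List.foldl_append, ih]
      simp only [List.foldl_cons, List.foldl_nil]
      rw [show ((m : Int) + 1) = ((m + 1 : Nat) : Int) by push_cast; ring, pvComb_natCast,
        pvS_succ]
      push_cast; ring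

-- A's descending scan computes Nat.findGreatest of the budget predicate
lemma pvALoop_eq_findGreatest (n budget : Int) (m : Nat) :
    pvALoop n budget (PySem.List.pyRange (m : Int) (-1) (-1))
      = (Nat.findGreatest (fun j => (pvS n.toNat j : Int) ≤ budget) m : Int) := by
  induction m with
  | zero =>
      rw [PySem.List.pyRange_neg_one_cons (by omega),
        PySem.List.pyRange_neg_one_eq_nil (by omega)]
      simp only [pvALoop]
      rw [pvALoop_total n 0]
      split <;> simp
  | succ m ih =>
      rw [PySem.List.pyRange_neg_one_cons (by omega)]
      simp only [pvALoop]
      rw [pvALoop_total n (m + 1),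
        show ((m + 1 : Nat) : Int) - 1 = (m : Int) by push_cast; ring, ih,
        Nat.findGreatest_succ]
      split_ifs with h <;> simp

-- B's ascending loop also computes Nat.findGreatest
lemma pvBLoop_eq_findGreatest (n budget : Int) (capN : Nat) :
    ∀ (fuel r : Nat), capN ≤ r + fuel → r ≤ capN →
      (pvS n.toNat r : Int) ≤ budget →
      pvBLoop n budget (capN : Int) fuel (pvS n.toNat r : Int) (r : Int)
        = (Nat.findGreatest (fun j => (pvS n.toNat j : Int) ≤ budget) capN : Int) := by
  intro fuel
  induction fuel with
  | zero =>
      intro r hfuel hr hP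
      have : r = capN := by omega
      subst this
      rw [pvBLoop, Nat.findGreatest_eq hP]
  | succ fuel ih =>
      intro r hfuel hr hP
      have hcast : ((r : Int) + 1) = ((r + 1 : Nat) : Int) := by push_cast; ring
      rw [pvBLoop]
      split_ifs with hlt hbud
      · -- r < cap and the next total exceeds the budget: stop at r, it is the greatest
        have hrlt : r < capN := by exact_mod_cast hlt
        rw [hcast, pvComb_natCast] at hbud
        have hnext : ¬ ((pvS n.toNat (r + 1) : Int) ≤ budget) := by
          rw [pvS_succ]; push_cast at hbud ⊢; omega
        have hfg : Nat.findGreatest (fun j => (pvS n.toNat j : Int) ≤ budget) capN = r := by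
          rw [Nat.findGreatest_eq_iff]
          refine ⟨le_of_lt hrlt, fun _ => hP, ?_⟩
          intro j hj hjle hPj
          exact hnext (le_trans
            (by exact_mod_cast Nat.cast_le.2 (pvS_mono n.toNat (by omega))) hPj)
        rw [hfg]
      · -- continue with r + 1
        have hrlt : r < capN := by exact_mod_cast hlt
        rw [hcast, pvComb_natCast] at hbud ⊢
        have hnext : (pvS n.toNat (r + 1) : Int) ≤ budget := by
          rw [pvS_succ]; push_cast at hbud ⊢; omega
        rw [show ((pvS n.toNat r : Int) + (Nat.choose n.toNat (r + 1) : Int))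
              = ((pvS n.toNat (r + 1) : Nat) : Int) by rw [pvS_succ]; push_cast; ring]
        exact ih (r + 1) (by omega) (by omega) hnext
      · -- the loop guard fails: r = capN, r is the answer
        have : capN ≤ r := by exact_mod_cast not_lt.mp hlt
        have : r = capN := by omega
        subst this
        rw [Nat.findGreatest_eq hP]

-- ===== VERDICT (by name: the statement is the Claim_ definition above) =====
theorem elective_combo_max_r_py_spec : Claim_equal_elective_combo_max_r_py := by
  intro n d budget _
  unfold Spec_elective_combo_max_r_py elective_combo_max_r_py elective_combo_max_r_py_alt
  split_ifs with h
  · rfl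
  · have hb : 1 ≤ budget := by omega
    have hcap0 : (0 : Int) ≤ min (max 0 d) n := le_min (le_max_left 0 d) (by omega)
    obtain ⟨capN, hc⟩ : ∃ m : Nat, min (max 0 d) n = (m : Int) :=
      ⟨_, (Int.toNat_of_nonneg hcap0).symm⟩
    have hS0 : (pvS n.toNat 0 : Int) = 1 := by simp [pvS]
    show pvALoop n budget (PySem.List.pyRange (min (max 0 d) n) (-1) (-1))
        = pvBLoop n budget (min (max 0 d) n) (min (max 0 d) n).toNat 1 0
    rw [hc, Int.toNat_natCast, pvALoop_eq_findGreatest n budget capN]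
    have hB := pvBLoop_eq_findGreatest n budget capN capN 0 (by omega) (by omega)
      (by rw [hS0]; omega)
    rw [hS0, Nat.cast_zero] at hB
    exact hB.symm
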